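-- pv_equiv track=rewrite | github.com/0xMishee/AdventOfCode2024 | Day 2/solution.py | safe_report_count_fault_tolerance
-- ===== SOURCE A (Python) =====
-- def safe_report_count(row, min_val=1, max_val=3) -> int:
--     """Counts the number of safe reports without fault tolerance."""
--     return 1 if all(min_val <= row[i+1] - row[i] <= max_val for i in range(len(row) - 1)) \
--              or all(min_val <= row[i] - row[i+1] <= max_val for i in range(len(row) - 1)) else 0
--
-- def safe_report_count_fault_tolerance(row) -> int:
--     """Counts the number of safe reports with fault tolerance."""
--
--     if safe_report_count(row):
--         return 1
--
--     safe: int = 0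
--
--     if safe_report_count(row):
--         return 1
--
--     for i in range(len(row)):
--         fault_tolerated_report = row[:i] + row[i+1:]
--         if safe_report_count(fault_tolerated_report):
--             safe += 1
--             break
--
--     return safe
-- ===== SOURCE B (Python) =====
-- def safe_report_count_fault_tolerance(row) -> int:
--     """Counts the number of safe reports with fault tolerance.
--     Single pass: find the first violating adjacent pair; only removing one of
--     its two elements can possibly repair the report. O(n) instead of O(n^2)."""
--
--     def ok(lo, hi, xs):
--         return all(lo <= b - a <= hi for a, b in zip(xs, xs[1:]))
--
--     def first_bad(lo, hi, xs):
--         for j, (a, b) in enumerate(zip(xs, xs[1:])):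
--             if not (lo <= b - a <= hi):
--                 return j
--         return None
--
--     def tolerant(lo, hi, xs):
--         j = first_bad(lo, hi, xs)
--         if j is None:
--             return True
--         return ok(lo, hi, xs[:j] + xs[j + 1:]) or ok(lo, hi, xs[:j + 1] + xs[j + 2:])
--
--     return 1 if tolerant(1, 3, row) or tolerant(-3, -1, row) else 0
-- ===== Notes on version B (the rewrite author's own statement) =====
-- stated objective: faster
-- what changed: A rechecks all n one-element deletions (each an O(n) scan); B makes a single pass per direction, finds the first violating adjacent pair and tests removing only its two elements, since deleting any other element leaves that bad pair adjacent.
import Mathlib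
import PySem

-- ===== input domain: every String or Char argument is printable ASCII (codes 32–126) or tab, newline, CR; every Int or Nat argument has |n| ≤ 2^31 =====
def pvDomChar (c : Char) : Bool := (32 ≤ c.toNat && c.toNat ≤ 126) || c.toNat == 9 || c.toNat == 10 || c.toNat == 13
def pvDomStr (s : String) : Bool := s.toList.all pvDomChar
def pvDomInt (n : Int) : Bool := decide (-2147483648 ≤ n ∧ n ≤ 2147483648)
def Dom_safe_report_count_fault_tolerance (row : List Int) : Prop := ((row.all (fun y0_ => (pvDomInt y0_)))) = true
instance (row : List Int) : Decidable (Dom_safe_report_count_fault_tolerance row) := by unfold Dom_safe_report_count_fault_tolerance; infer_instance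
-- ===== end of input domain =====

-- B replaces A's scan over all n one-element deletions (each rechecked in O(n)) by a single
-- pass that finds the first violating adjacent pair per direction and tests removing only
-- its two elements (objective: faster).

-- ===== PORT A =====
-- helper safe_report_count (defaults min_val=1, max_val=3 passed explicitly at call sites)
def pySafe (row : List Int) (min_val max_val : Int) : Int :=
  if ((PySem.List.pyRange 0 ((row.length : Int) - 1) 1).all (fun i =>
        decide (min_val ≤ PySem.List.pyGetD row (i+1) 0 - PySem.List.pyGetD row i 0 ∧
                PySem.List.pyGetD row (i+1) 0 - PySem.List.pyGetD row i 0 ≤ max_val)))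
     || ((PySem.List.pyRange 0 ((row.length : Int) - 1) 1).all (fun i =>
        decide (min_val ≤ PySem.List.pyGetD row i 0 - PySem.List.pyGetD row (i+1) 0 ∧
                PySem.List.pyGetD row i 0 - PySem.List.pyGetD row (i+1) 0 ≤ max_val)))
  then 1 else 0

-- the 'for i in range(len(row)): … break' loop (safe is 1 after the break, 0 otherwise)
def aLoop (row : List Int) : List Int → Int
  | [] => 0
  | i :: rest =>
      if pySafe (PySem.List.slice row none (some i) ++ PySem.List.slice row (some (i+1)) none) 1 3 ≠ 0
      then 1 else aLoop row rest

def safe_report_count_fault_tolerance (row : List Int) : Int :=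
  if pySafe row 1 3 ≠ 0 then 1
  else if pySafe row 1 3 ≠ 0 then 1
  else aLoop row (PySem.List.pyRange 0 (row.length : Int) 1)

-- ===== PORT B =====
-- ok: all adjacent differences within [lo, hi] (B's zip(xs, xs[1:]) check)
def okFrom (lo hi : Int) : List Int → Bool
  | x :: y :: t => (decide (lo ≤ y - x) && decide (y - x ≤ hi)) && okFrom lo hi (y :: t)
  | _ => true

-- first_bad: index of the first violating adjacent pair, none if safe
def firstBad (lo hi : Int) : List Int → Option Nat
  | x :: y :: t =>
      if lo ≤ y - x ∧ y - x ≤ hi then (firstBad lo hi (y :: t)).map (· + 1) else some 0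
  | _ => none

-- tolerant: safe as is, or safe after deleting one of the two elements of the first bad pair
def tolerant (lo hi : Int) (xs : List Int) : Bool :=
  match firstBad lo hi xs with
  | none => true
  | some j =>
      okFrom lo hi (xs.take j ++ xs.drop (j+1)) || okFrom lo hi (xs.take (j+1) ++ xs.drop (j+2))

def safe_report_count_fault_tolerance_alt (row : List Int) : Int :=
  if tolerant 1 3 row || tolerant (-3) (-1) row then 1 else 0

-- ===== PRECONDITION & SPEC =====
def Spec_safe_report_count_fault_tolerance (row : List Int) (out : Int) : Prop := out = safe_report_count_fault_tolerance_alt row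
instance (row : List Int) (out : Int) : Decidable (Spec_safe_report_count_fault_tolerance row out) := by unfold Spec_safe_report_count_fault_tolerance; infer_instance

-- ===== CLAIM (what is proved, stated in full; the proofs are below) =====
def Claim_equal_safe_report_count_fault_tolerance : Prop := ∀ (row : List Int), Dom_safe_report_count_fault_tolerance row → Spec_safe_report_count_fault_tolerance row (safe_report_count_fault_tolerance row)

-- ===== LEMMAS AND PROOFS =====

-- all adjacent differences of l lie in [lo, hi], phrased over Nat indices
def Good (lo hi : Int) (l : List Int) : Prop :=
  ∀ n : Nat, n + 1 < l.length →
    lo ≤ l.getD (n+1) 0 - l.getD n 0 ∧ l.getD (n+1) 0 - l.getD n 0 ≤ hi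

theorem okFrom_iff (lo hi : Int) (l : List Int) : okFrom lo hi l = true ↔ Good lo hi l := by
  induction l with
  | nil => simp [okFrom, Good]
  | cons x t ih =>
    cases t with
    | nil => simp [okFrom, Good]
    | cons y t2 =>
      simp only [okFrom, Bool.and_eq_true, decide_eq_true_eq, ih]
      constructor
      · rintro ⟨⟨h1, h2⟩, hg⟩ n hn
        match n with
        | 0 => simp only [List.getD_cons_succ, List.getD_cons_zero]; omega
        | (m+1) =>
          have := hg m (by simpa [Nat.succ_lt_succ_iff] using hn)
          simpa using this
      · intro hg
        refine ⟨?_, fun m hm => ?_⟩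
        · have := hg 0 (by simp)
          simp only [List.getD_cons_succ, List.getD_cons_zero] at this
          exact this
        · have := hg (m+1) (by simpa [Nat.succ_lt_succ_iff] using hm)
          simpa using this

theorem firstBad_none (lo hi : Int) (l : List Int) :
    firstBad lo hi l = none ↔ okFrom lo hi l = true := by
  induction l with
  | nil => simp [firstBad, okFrom]
  | cons x t ih =>
    cases t with
    | nil => simp [firstBad, okFrom]
    | cons y t2 =>
      simp only [firstBad, okFrom]
      split_ifs with h
      · simp [Option.map_eq_none_iff, ih, h]
      · constructor
        · intro hc; simp at hc
        · intro hc
          simp only [Bool.and_eq_true, decide_eq_true_eq] at hc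
          exact absurd ⟨hc.1.1, hc.1.2⟩ h

theorem firstBad_some (lo hi : Int) (l : List Int) (j : Nat)
    (h : firstBad lo hi l = some j) :
    j + 1 < l.length ∧
    ¬ (lo ≤ l.getD (j+1) 0 - l.getD j 0 ∧ l.getD (j+1) 0 - l.getD j 0 ≤ hi) := by
  induction l generalizing j with
  | nil => simp [firstBad] at h
  | cons x t ih =>
    cases t with
    | nil => simp [firstBad] at h
    | cons y t2 =>
      rw [firstBad] at h
      split_ifs at h with hc
      · rcases Option.map_eq_some_iff.mp h with ⟨j', hj', rfl⟩
        obtain ⟨hlen, hbad⟩ := ih j' hj'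
        refine ⟨by simpa [Nat.succ_lt_succ_iff] using hlen, by simpa using hbad⟩
      · rcases Option.some.inj h with rfl
        exact ⟨by simp, by simpa using hc⟩

theorem getD_eraseIdx (l : List Int) (k i : Nat) (d : Int) :
    (l.eraseIdx k).getD i d = if i < k then l.getD i d else l.getD (i+1) d := by
  rw [List.getD_eq_getElem?_getD, List.getElem?_eraseIdx]
  split <;> simp [List.getD_eq_getElem?_getD]

-- if pair j is bad, deleting any k ∉ {j, j+1} leaves that bad pair adjacent
theorem repair (lo hi : Int) (l : List Int) (j k : Nat)
    (hj : j + 1 < l.length)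
    (hbad : ¬ (lo ≤ l.getD (j+1) 0 - l.getD j 0 ∧ l.getD (j+1) 0 - l.getD j 0 ≤ hi))
    (hk : k < l.length)
    (hok : Good lo hi (l.eraseIdx k)) : k = j ∨ k = j + 1 := by
  by_contra hcon
  push_neg at hcon
  obtain ⟨hkj, hkj1⟩ := hcon
  have hlen : (l.eraseIdx k).length = l.length - 1 := by
    simp [List.length_eraseIdx, hk]
  rcases Nat.lt_or_ge k j with hlt | hge
  · have h1 : (j - 1) + 1 < (l.eraseIdx k).length := by omega
    have hp := hok (j - 1) h1
    rw [getD_eraseIdx, getD_eraseIdx] at hp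
    rw [if_neg (by omega), if_neg (by omega)] at hp
    have e1 : j - 1 + 1 = j := by omega
    rw [e1] at hp
    exact hbad hp
  · have hge2 : j + 2 ≤ k := by omega
    have h1 : j + 1 < (l.eraseIdx k).length := by omega
    have hp := hok j h1
    rw [getD_eraseIdx, getD_eraseIdx] at hp
    rw [if_pos (by omega), if_pos (by omega)] at hp
    exact hbad hp

theorem tolerant_iff (lo hi : Int) (xs : List Int) :
    tolerant lo hi xs = true ↔
      (okFrom lo hi xs = true ∨
        ∃ k : Nat, k < xs.length ∧ okFrom lo hi (xs.eraseIdx k) = true) := by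
  unfold tolerant
  cases h : firstBad lo hi xs with
  | none =>
    simp only [((firstBad_none lo hi xs).mp h)]
    simp
  | some j =>
    obtain ⟨hj, hbad⟩ := firstBad_some lo hi xs j h
    have hxs : ¬ okFrom lo hi xs = true := by
      rw [okFrom_iff]
      intro hg
      exact hbad (hg j hj)
    have e1 : xs.take j ++ xs.drop (j+1) = xs.eraseIdx j :=
      (List.eraseIdx_eq_take_drop_succ xs j).symm
    have e2 : xs.take (j+1) ++ xs.drop (j+2) = xs.eraseIdx (j+1) :=
      (List.eraseIdx_eq_take_drop_succ xs (j+1)).symm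
    show (okFrom lo hi (xs.take j ++ xs.drop (j+1)) ||
        okFrom lo hi (xs.take (j+1) ++ xs.drop (j+2))) = true ↔ _
    rw [e1, e2]
    simp only [Bool.or_eq_true]
    constructor
    · rintro (hok | hok)
      · exact Or.inr ⟨j, by omega, hok⟩
      · exact Or.inr ⟨j + 1, by omega, hok⟩
    · rintro (hok | ⟨k, hk, hok⟩)
      · exact absurd hok hxs
      · rcases repair lo hi xs j k hj hbad hk ((okFrom_iff lo hi _).mp hok) with rfl | rfl
        · exact Or.inl hok
        · exact Or.inr hok

-- A's generator-`all` over range(len(row)-1) as a statement over Nat indices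
theorem all_range_iff (row : List Int) (p : Int → Int → Bool) :
    ((PySem.List.pyRange 0 ((row.length : Int) - 1) 1).all
        (fun i => p (PySem.List.pyGetD row i 0) (PySem.List.pyGetD row (i+1) 0)) = true)
      ↔ ∀ n : Nat, n + 1 < row.length → p (row.getD n 0) (row.getD (n+1) 0) = true := by
  rw [List.all_eq_true]
  constructor
  · intro h n hn
    have hmem : (n : Int) ∈ PySem.List.pyRange 0 ((row.length : Int) - 1) 1 := by
      rw [PySem.List.mem_pyRange_one]
      constructor <;> [positivity; omega]
    have := h _ hmem
    have e1 : (n : Int) + 1 = ((n + 1 : Nat) : Int) := by push_cast; ring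
    rw [e1, PySem.List.pyGetD_natCast, PySem.List.pyGetD_natCast] at this
    exact this
  · intro h i hi
    rw [PySem.List.mem_pyRange_one] at hi
    obtain ⟨h0, h1⟩ := hi
    have e : i = ((i.toNat : Nat) : Int) := by omega
    rw [e]
    have e1 : ((i.toNat : Nat) : Int) + 1 = ((i.toNat + 1 : Nat) : Int) := by push_cast; ring
    rw [e1, PySem.List.pyGetD_natCast, PySem.List.pyGetD_natCast]
    exact h i.toNat (by omega)

theorem pySafe_ne_zero (row : List Int) :
    (pySafe row 1 3 ≠ 0) ↔ (okFrom 1 3 row = true ∨ okFrom (-3) (-1) row = true) := by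
  unfold pySafe
  split_ifs with h
  · simp only [Bool.or_eq_true] at h
    constructor
    · intro _
      rcases h with h | h
      · left
        rw [okFrom_iff]
        intro n hn
        have := (all_range_iff row (fun a b => decide (1 ≤ b - a ∧ b - a ≤ 3))).mp h n hn
        simpa using this
      · right
        rw [okFrom_iff]
        intro n hn
        have := (all_range_iff row (fun a b => decide (1 ≤ a - b ∧ a - b ≤ 3))).mp h n hn
        simp only [decide_eq_true_eq] at this
        omega
    · intro _; decide
  · simp only [Bool.or_eq_true, not_or] at h
    obtain ⟨h1, h2⟩ := h
    constructor
    · intro hcon; exact absurd rfl hcon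
    · rintro (hok | hok)
      · exact absurd ((all_range_iff row (fun a b => decide (1 ≤ b - a ∧ b - a ≤ 3))).mpr
          (by intro n hn; have := (okFrom_iff 1 3 row).mp hok n hn; simpa using this)) h1
      · exact absurd ((all_range_iff row (fun a b => decide (1 ≤ a - b ∧ a - b ≤ 3))).mpr
          (by intro n hn; have := (okFrom_iff (-3) (-1) row).mp hok n hn
              simp only [decide_eq_true_eq]; omega)) h2

theorem aLoop_eq (row : List Int) (is : List Int) :
    aLoop row is =
      (if ∃ i ∈ is, pySafe (PySem.List.slice row none (some i) ++
          PySem.List.slice row (some (i+1)) none) 1 3 ≠ 0 then 1 else 0) := by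
  induction is with
  | nil => simp [aLoop]
  | cons i rest ih =>
    rw [aLoop, ih]
    by_cases h : pySafe (PySem.List.slice row none (some i) ++
        PySem.List.slice row (some (i+1)) none) 1 3 ≠ 0
    · simp [h]
    · simp only [if_neg h]
      congr 1
      simp [h]

theorem slice_del (row : List Int) (k : Nat) :
    PySem.List.slice row none (some ((k : Nat) : Int)) ++
      PySem.List.slice row (some (((k : Nat) : Int) + 1)) none = row.eraseIdx k := by
  have e1 : ((k : Nat) : Int) + 1 = ((k + 1 : Nat) : Int) := by push_cast; ring
  rw [e1, PySem.List.slice_to_natCast, PySem.List.slice_from_natCast,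
    List.eraseIdx_eq_take_drop_succ]

theorem exists_del_iff (row : List Int) :
    (∃ i ∈ PySem.List.pyRange 0 (row.length : Int) 1,
        pySafe (PySem.List.slice row none (some i) ++
          PySem.List.slice row (some (i+1)) none) 1 3 ≠ 0)
      ↔ ∃ k : Nat, k < row.length ∧ pySafe (row.eraseIdx k) 1 3 ≠ 0 := by
  constructor
  · rintro ⟨i, hmem, hne⟩
    rw [PySem.List.mem_pyRange_one] at hmem
    obtain ⟨h0, h1⟩ := hmem
    refine ⟨i.toNat, by omega, ?_⟩
    have e : i = ((i.toNat : Nat) : Int) := by omega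
    rw [e, slice_del] at hne
    exact hne
  · rintro ⟨k, hk, hne⟩
    refine ⟨(k : Int), ?_, ?_⟩
    · rw [PySem.List.mem_pyRange_one]; constructor <;> [positivity; omega]
    · rw [slice_del]; exact hne

-- ===== VERDICT (by name: the statement is the Claim_ definition above) =====
theorem safe_report_count_fault_tolerance_spec : Claim_equal_safe_report_count_fault_tolerance := by
  intro row _
  unfold Spec_safe_report_count_fault_tolerance
  unfold safe_report_count_fault_tolerance safe_report_count_fault_tolerance_alt
  by_cases hs : pySafe row 1 3 ≠ 0
  · rw [if_pos hs]
    rcases (pySafe_ne_zero row).mp hs with hok | hok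
    · rw [if_pos]
      simp only [Bool.or_eq_true]
      exact Or.inl ((tolerant_iff 1 3 row).mpr (Or.inl hok))
    · rw [if_pos]
      simp only [Bool.or_eq_true]
      exact Or.inr ((tolerant_iff (-3) (-1) row).mpr (Or.inl hok))
  · rw [if_neg hs, if_neg hs, aLoop_eq]
    by_cases he : ∃ k : Nat, k < row.length ∧ pySafe (row.eraseIdx k) 1 3 ≠ 0
    · rw [if_pos ((exists_del_iff row).mpr he)]
      obtain ⟨k, hk, hne⟩ := he
      rcases (pySafe_ne_zero _).mp hne with hok | hok
      · rw [if_pos]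
        simp only [Bool.or_eq_true]
        exact Or.inl ((tolerant_iff 1 3 row).mpr (Or.inr ⟨k, hk, hok⟩))
      · rw [if_pos]
        simp only [Bool.or_eq_true]
        exact Or.inr ((tolerant_iff (-3) (-1) row).mpr (Or.inr ⟨k, hk, hok⟩))
    · rw [if_neg (fun hc => he ((exists_del_iff row).mp hc))]
      rw [if_neg]
      simp only [Bool.or_eq_true, not_or]
      push_neg at hs
      constructor
      · intro hc
        rcases (tolerant_iff 1 3 row).mp hc with hok | ⟨k, hk, hok⟩
        · exact absurd ((pySafe_ne_zero row).mpr (Or.inl hok)) (by simpa using hs)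
        · exact he ⟨k, hk, (pySafe_ne_zero _).mpr (Or.inl hok)⟩
      · intro hc
        rcases (tolerant_iff (-3) (-1) row).mp hc with hok | ⟨k, hk, hok⟩
        · exact absurd ((pySafe_ne_zero row).mpr (Or.inr hok)) (by simpa using hs)
        · exact he ⟨k, hk, (pySafe_ne_zero _).mpr (Or.inr hok)⟩
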